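-- pv_equiv track=rewrite | github.com/shihhsinwang0214/SCHull | SCHull.py | adj_arr
-- ===== SOURCE A (Python) =====
-- def adj_arr(adj_list):
--     arr = [[], []]
--     for key in adj_list:
--         temp = adj_list[key].copy()
--         for k in range(len(temp)):
--             arr[0].append(int(key))
--             arr[1].append(int(temp[k]))
--     return arr
-- ===== SOURCE B (Python) =====
-- def adj_arr(adj_list):
--     # Collect all edges as (source, target) pairs first, then transpose.
--     pairs = [(int(key), int(n)) for key in adj_list for n in adj_list[key]]
--     if not pairs:
--         return [[], []]
--     a, b = zip(*pairs)
--     return [list(a), list(b)]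
-- ===== Notes on version B (the rewrite author's own statement) =====
-- stated objective: alternative
-- what changed: B builds the complete edge list as (key, neighbor) pairs in one comprehension and then transposes it with zip(*pairs) into the two rows, instead of A's simultaneous append into two growing columns inside nested loops.
import Mathlib
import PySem

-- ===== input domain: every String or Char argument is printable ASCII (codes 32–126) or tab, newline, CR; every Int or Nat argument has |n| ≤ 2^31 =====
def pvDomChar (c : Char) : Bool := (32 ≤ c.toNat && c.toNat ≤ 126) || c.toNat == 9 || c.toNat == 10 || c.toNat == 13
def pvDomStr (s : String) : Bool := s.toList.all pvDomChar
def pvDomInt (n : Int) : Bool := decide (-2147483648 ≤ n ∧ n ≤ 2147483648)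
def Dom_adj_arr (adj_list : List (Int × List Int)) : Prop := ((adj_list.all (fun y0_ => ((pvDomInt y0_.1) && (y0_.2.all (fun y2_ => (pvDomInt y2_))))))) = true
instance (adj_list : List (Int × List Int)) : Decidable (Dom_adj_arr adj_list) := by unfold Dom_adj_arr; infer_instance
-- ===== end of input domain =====

-- B re-implements adj_arr by collecting all (key, neighbor) edge pairs first and transposing them
-- into the two rows (alternative decomposition, same cost); A appends to both rows in lockstep.


-- ===== PORT A =====
-- 'adj_list[key]' on the assoc-list encoding of a Python dict: first match (keys of a dict are distinct).
def pvLookup (d : List (Int × List Int)) (k : Int) : List Int :=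
  ((d.find? (fun p => p.1 == k)).map Prod.snd).getD []

-- A: two growing rows, appended in lockstep over each key's neighbor list (int(key)=key on int inputs).
def adj_arr (adj_list : List (Int × List Int)) : List (List Int) :=
  let arr := adj_list.foldl
    (fun (arr : List Int × List Int) kv =>
      let temp := pvLookup adj_list kv.1
      (PySem.List.pyRange 0 (PySem.List.len temp) 1).foldl
        (fun (a : List Int × List Int) k => (a.1 ++ [kv.1], a.2 ++ [PySem.List.pyGetD temp k 0]))
        arr)
    ([], [])
  [arr.1, arr.2]

-- ===== PORT B =====
-- B: collect all (key, neighbor) pairs first, then transpose (zip(*pairs)) into the two rows.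
def adj_arr_alt (adj_list : List (Int × List Int)) : List (List Int) :=
  let pairs := adj_list.flatMap
    (fun kv => (pvLookup adj_list kv.1).map (fun n => (kv.1, n)))
  if pairs.isEmpty then [[], []]
  else [pairs.map Prod.fst, pairs.map Prod.snd]

-- ===== PRECONDITION & SPEC =====
def Spec_adj_arr (adj_list : List (Int × List Int)) (out : List (List Int)) : Prop := out = adj_arr_alt adj_list
instance (adj_list : List (Int × List Int)) (out : List (List Int)) : Decidable (Spec_adj_arr adj_list out) := by unfold Spec_adj_arr; infer_instance

-- ===== CLAIM (what is proved, stated in full; the proofs are below) =====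
def Claim_equal_adj_arr : Prop := ∀ (adj_list : List (Int × List Int)), Dom_adj_arr adj_list → Spec_adj_arr adj_list (adj_arr adj_list)

-- ===== LEMMAS AND PROOFS =====

-- ===== VERDICT (by name: the statement is the Claim_ definition above) =====
-- A's fold, with both rows carried as one pair, is the pair of mapped flatMaps.
theorem adj_arr_fold_eq (d l : List (Int × List Int)) (a b : List Int) :
    l.foldl
      (fun (arr : List Int × List Int) kv =>
        let temp := pvLookup d kv.1
        (PySem.List.pyRange 0 (PySem.List.len temp) 1).foldl
          (fun (acc : List Int × List Int) k => (acc.1 ++ [kv.1], acc.2 ++ [PySem.List.pyGetD temp k 0]))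
          arr)
      (a, b)
    = (a ++ l.flatMap (fun kv => (pvLookup d kv.1).map (fun _ => kv.1)),
       b ++ l.flatMap (fun kv => pvLookup d kv.1)) := by
  induction l generalizing a b with
  | nil => simp
  | cons kv t ih =>
    simp only [List.foldl_cons, List.flatMap_cons]
    rw [PySem.List.foldl_pyRange_zero_pyGetD (pvLookup d kv.1) 0
          (fun acc x => (acc.1 ++ [kv.1], acc.2 ++ [x])) (a, b)]
    rw [PySem.List.foldl_prod_mk (f := fun acc _ => acc ++ [kv.1]) (g := fun acc x => acc ++ [x])]
    rw [PySem.List.foldl_append_singleton_eq_map, PySem.List.foldl_append_singleton_eq_self, ih]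
    simp

theorem adj_arr_spec : Claim_equal_adj_arr := by
  intro d _
  unfold Spec_adj_arr adj_arr adj_arr_alt
  rw [adj_arr_fold_eq d d [] []]
  simp only [List.nil_append, List.isEmpty_iff]
  by_cases h : d.flatMap (fun kv => (pvLookup d kv.1).map (fun n => (kv.1, n))) = []
  · rw [if_pos h]
    rw [List.flatMap_eq_nil_iff] at h
    have hz : ∀ kv ∈ d, pvLookup d kv.1 = [] := by
      intro kv hm
      simpa [List.map_eq_nil_iff] using h _ hm
    simp only [List.cons.injEq, and_true, List.flatMap_eq_nil_iff]
    exact ⟨fun kv hm => by simp [hz kv hm], fun kv hm => hz kv hm⟩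
  · rw [if_neg h]
    simp [List.map_flatMap, List.map_map]
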